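-- pv_equiv track=rewrite | github.com/asweigart/programmedpatterns | book/visualpatterns.py | formula38
-- ===== SOURCE A (Python) =====
-- def formula38(step):
--     count = 2
--     i = 2
--     while True:
--         if i > step:
--             break
--         count += 3
--         i += 1
--
--         if i > step:
--             break
--         count += 2
--         i += 1
--
--         if i > step:
--             break
--         count += 1
--         i += 1
--     return count
-- ===== SOURCE B (Python) =====
-- def formula38(step):
--     n = max(step - 1, 0)
--     q, r = divmod(n, 3)
--     return 2 + 6 * q + (0, 3, 5)[r]
-- ===== Notes on version B (the rewrite author's own statement) =====
-- stated objective: faster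
-- what changed: Replaced the O(step) while-loop that adds the repeating +3,+2,+1 pattern with a closed form: each complete cycle of 3 steps adds 6, plus a small table lookup for the remainder.
import Mathlib
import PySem

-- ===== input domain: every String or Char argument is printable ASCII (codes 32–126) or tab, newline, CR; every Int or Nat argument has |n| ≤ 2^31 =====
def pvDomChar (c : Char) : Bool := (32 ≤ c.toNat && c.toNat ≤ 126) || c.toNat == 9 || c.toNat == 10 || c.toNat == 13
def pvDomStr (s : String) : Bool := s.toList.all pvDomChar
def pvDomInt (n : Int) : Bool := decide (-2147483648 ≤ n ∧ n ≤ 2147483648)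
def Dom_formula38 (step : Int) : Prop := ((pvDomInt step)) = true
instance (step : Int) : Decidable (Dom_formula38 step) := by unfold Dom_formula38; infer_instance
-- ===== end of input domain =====

-- B replaces A's O(step) loop over the repeating +3,+2,+1 pattern by a closed form (6 per complete cycle of 3, table for the remainder): faster.

-- ===== PORT A =====
-- literal transliteration of A's while-True loop (one recursive call per unrolled loop body)
def formula38Loop (step i count : Int) : Int :=
  if i > step then count
  else
    let count := count + 3
    let i := i + 1
    if i > step then count
    else
      let count := count + 2
      let i := i + 1
      if i > step then count
      else formula38Loop step (i + 1) (count + 1)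
termination_by (step + 1 - i).toNat
decreasing_by omega

def formula38 (step : Int) : Int := formula38Loop step 2 2

-- ===== PORT B =====
def formula38_alt (step : Int) : Int :=
  let n := max (step - 1) 0
  let q := PySem.Int.floordiv n 3
  let r := PySem.Int.mod n 3
  2 + 6 * q + (if r = 0 then 0 else if r = 1 then 3 else 5)

-- ===== PRECONDITION & SPEC =====
def Spec_formula38 (step : Int) (out : Int) : Prop := out = formula38_alt step
instance (step : Int) (out : Int) : Decidable (Spec_formula38 step out) := by unfold Spec_formula38; infer_instance

-- ===== CLAIM (what is proved, stated in full; the proofs are below) =====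
def Claim_equal_formula38 : Prop := ∀ (step : Int), Dom_formula38 step → Spec_formula38 step (formula38 step)

-- ===== LEMMAS AND PROOFS =====

-- value added by the loop as a function of the number of remaining iterations
def gPat (n : Nat) : Int :=
  6 * (n / 3 : Nat) + (if n % 3 = 0 then 0 else if n % 3 = 1 then 3 else 5)

theorem gPat_add_three (m : Nat) : gPat (m + 3) = gPat m + 6 := by
  simp [gPat, Nat.add_div_right, Nat.add_mod_right]
  split_ifs <;> ring

theorem formula38Loop_eq (step i count : Int) :
    formula38Loop step i count = count + gPat (step + 1 - i).toNat := by
  fun_induction formula38Loop step i count with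
  | case1 i count h =>
      have h0 : (step + 1 - i).toNat = 0 := by omega
      simp [h0, gPat]
  | case2 i count h1 c2 i2 h2 =>
      dsimp only at *
      have h0 : (step + 1 - i).toNat = 1 := by omega
      simp only [h0, gPat]
      show count + 3 = count + (6 * ((1:Nat) / 3 : Nat) + if (1:Nat) % 3 = 0 then 0 else if (1:Nat) % 3 = 1 then 3 else 5)
      norm_num
  | case3 i count h1 c2 i2 h2 c3 i3 h3 =>
      dsimp only at *
      have h0 : (step + 1 - i).toNat = 2 := by omega
      simp only [h0, gPat]
      show count + 3 + 2 = count + (6 * ((2:Nat) / 3 : Nat) + if (2:Nat) % 3 = 0 then 0 else if (2:Nat) % 3 = 1 then 3 else 5)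
      norm_num
      ring
  | case4 i count h1 c2 i2 h2 c3 i3 h3 ih =>
      dsimp only at *
      rw [ih]
      have hm : (step + 1 - i).toNat = (step + 1 - (i + 1 + 1 + 1)).toNat + 3 := by omega
      rw [hm, gPat_add_three]
      ring

-- ===== VERDICT (by name: the statement is the Claim_ definition above) =====
theorem formula38_spec : Claim_equal_formula38 := by
  intro step _
  show formula38 step = formula38_alt step
  rw [formula38, formula38Loop_eq, formula38_alt]
  by_cases h : step ≤ 1
  · have h0 : (step + 1 - 2).toNat = 0 := by omega
    have hm : max (step - 1) 0 = 0 := by omega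
    simp [h0, hm, gPat, PySem.Int.floordiv, PySem.Int.mod]
  · have hm : max (step - 1) 0 = ((step - 1).toNat : Int) := by omega
    have h2 : (step + 1 - 2).toNat = (step - 1).toNat := by omega
    rw [hm, h2, gPat]
    set k := (step - 1).toNat with hk
    have hf : PySem.Int.floordiv ((k : Nat) : Int) 3 = ((k / 3 : Nat) : Int) := by
      exact_mod_cast PySem.Int.floordiv_natCast k 3
    have hmo : PySem.Int.mod ((k : Nat) : Int) 3 = ((k % 3 : Nat) : Int) := by
      exact_mod_cast PySem.Int.mod_natCast k 3
    rw [hf, hmo]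
    have h3 : k % 3 = 0 ∨ k % 3 = 1 ∨ k % 3 = 2 := by omega
    rcases h3 with h | h | h <;> simp [h] <;> ring
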